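-- pv_equiv track=rewrite | github.com/CX0905/2Spring | chaos_printmore.py | analyze_cycles
-- ===== SOURCE A (Python) =====
-- from collections import defaultdict
-- from math import gcd
-- from functools import reduce
--
-- def lcm(a, b):
--     """计算最小公倍数"""
--     return a * b // gcd(a, b)
--
-- def analyze_cycles(permutation):
--     """分析置乱表的循环特性"""
--     N = len(permutation)
--     visited = [False] * N
--     cycle_info = defaultdict(int)
--
--     for i in range(N):
--         if not visited[i]:
--             cycle_length = 0
--             j = i
--             current_cycle = []
--             while not visited[j]:
--                 visited[j] = True
--                 current_cycle.append(j)
--                 j = permutation[j]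
--                 cycle_length += 1
--             cycle_info[cycle_length] += 1
--
--     # 计算总阶(所有循环长度的最小公倍数)
--     if cycle_info:
--         cycle_lengths = list(cycle_info.keys())
--         total_order = reduce(lcm, cycle_lengths, 1)
--     else:
--         total_order = 1
--
--     return dict(cycle_info), total_order
-- ===== SOURCE B (Python) =====
-- from math import lcm
-- from functools import reduce
--
-- def analyze_cycles(permutation):
--     """分析置乱表的循环特性"""
--     n = len(permutation)
--     # min-label relaxation: lab[j] converges to the smallest start index whose
--     # forward orbit reaches j (a Bellman-Ford-style fixpoint, no traversal state)
--     lab = list(range(n))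
--     changed = True
--     while changed:
--         changed = False
--         for k in range(n):
--             t = permutation[k]
--             if lab[k] < lab[t]:
--                 lab[t] = lab[k]
--                 changed = True
--     sizes = {}
--     for l in lab:
--         sizes[l] = sizes.get(l, 0) + 1
--     cycle_info = {}
--     for s in sizes.values():
--         cycle_info[s] = cycle_info.get(s, 0) + 1
--     total_order = reduce(lcm, cycle_info, 1)
--     return cycle_info, total_order
-- ===== Notes on version B (the rewrite author's own statement) =====
-- stated objective: alternative
-- what changed: B replaces A's visited-array cycle walks entirely by a Bellman-Ford-style min-label relaxation: every index starts as its own label, labels are relaxed along i -> permutation[i] edges until a fixpoint, and the component structure is then read off by grouping equal labels; no traversal, no visited set. Pre_ excludes exactly the inputs on which A raises IndexError (an entry outside [-N, N-1]).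
import Mathlib
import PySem

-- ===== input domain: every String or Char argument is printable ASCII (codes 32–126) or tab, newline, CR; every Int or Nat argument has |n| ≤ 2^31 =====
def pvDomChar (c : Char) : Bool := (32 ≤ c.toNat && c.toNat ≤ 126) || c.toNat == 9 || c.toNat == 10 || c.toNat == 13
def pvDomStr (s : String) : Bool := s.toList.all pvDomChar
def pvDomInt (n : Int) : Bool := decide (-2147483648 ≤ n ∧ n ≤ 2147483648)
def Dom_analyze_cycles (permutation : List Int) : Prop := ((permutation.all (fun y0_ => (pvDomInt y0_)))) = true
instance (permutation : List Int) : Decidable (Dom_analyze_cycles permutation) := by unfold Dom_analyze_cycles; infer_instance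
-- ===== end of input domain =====

-- B is a different algorithm (same return value on Pre_): instead of A's visited-array cycle
-- walks, B relaxes per-index minimum labels along i → permutation[i] edges to a fixpoint and
-- groups equal labels; not claimed faster (A is linear, B's relaxation can need many passes).

-- ===== PORT A =====
-- lcm(a, b) = a * b // gcd(a, b)
def pyLcm (a b : Int) : Int := PySem.Int.floordiv (a * b) ((Int.gcd a b : Nat) : Int)

-- the inner 'while not visited[j]' loop of A; fuel N+1 is always enough (each step marks a cell)
def walkA (perm : List Int) (fuel : Nat) (visited : List Bool) (j cl : Int) (cyc : List Int) :
    List Bool × Int × List Int :=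
  match fuel with
  | 0 => (visited, cl, cyc)
  | fuel + 1 =>
    match PySem.List.pyGet? visited j with
    | none => (visited, cl, cyc)                    -- IndexError (outside Pre_)
    | some true => (visited, cl, cyc)
    | some false =>
      let visited' := PySem.List.pySetD visited j true
      let cyc' := cyc ++ [j]
      match PySem.List.pyGet? perm j with
      | none => (visited', cl, cyc')                -- IndexError (outside Pre_)
      | some j' => walkA perm fuel visited' j' (cl + 1) cyc'

-- body of A's 'for i in range(N)' loop
def pvStepA (perm : List Int) (n : Nat) (st : List Bool × PySem.Dict Int Int) (i : Nat) :
    List Bool × PySem.Dict Int Int :=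
  match PySem.List.pyGet? st.1 (i : Int) with
  | some false =>
    let r := walkA perm (n + 1) st.1 (i : Int) 0 []
    (r.1, st.2.modify r.2.1 0 (· + 1))
  | _ => st

def analyze_cycles (permutation : List Int) : (List (Int × Int)) × Int :=
  let N := permutation.length
  let st := (List.range N).foldl (pvStepA permutation N) (List.replicate N false, PySem.Dict.empty)
  let cycle_info := st.2
  let total : Int :=
    if cycle_info.size ≠ 0 then (cycle_info.keys).foldl pyLcm 1 else 1
  (cycle_info.items, total)

-- ===== PORT B =====
-- one 'for k in range(n)' sweep of B's relaxation; the Bool is the 'changed' flag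
def relaxPass (perm : List Int) (st : List Int × Bool) (k : Nat) : List Int × Bool :=
  match PySem.List.pyGet? perm (k : Int) with
  | none => st                                      -- IndexError (outside Pre_)
  | some t =>
    match PySem.List.pyGet? st.1 (k : Int), PySem.List.pyGet? st.1 t with
    | some lk, some lt =>
      if lk < lt then (PySem.List.pySetD st.1 t lk, true) else st
    | _, _ => st                                    -- IndexError (outside Pre_)

-- B's 'while changed' loop; every changed sweep strictly decreases the (nonnegative) label sum,
-- which starts below n*n, so fuel n*n+1 always reaches the fixpoint Python stops at
def relaxLoop (perm : List Int) (n : Nat) : Nat → List Int → List Int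
  | 0, lab => lab
  | fuel + 1, lab =>
    let st := (List.range n).foldl (relaxPass perm) (lab, false)
    if st.2 then relaxLoop perm n fuel st.1 else st.1

def analyze_cycles_alt (permutation : List Int) : (List (Int × Int)) × Int :=
  let n := permutation.length
  let lab := relaxLoop permutation n (n * n + 1) ((List.range n).map (fun j => Int.ofNat j))
  let sizes := lab.foldl
      (fun (d : PySem.Dict Int Int) l => d.insert l (d.getD l 0 + 1)) PySem.Dict.empty
  let cycle_info := (sizes.values).foldl
      (fun (d : PySem.Dict Int Int) s => d.insert s (d.getD s 0 + 1)) PySem.Dict.empty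
  (cycle_info.items, cycle_info.keys.foldl (fun a k => ((Int.lcm a k : Nat) : Int)) 1)

-- ===== PRECONDITION & SPEC =====
-- Pre_ excludes exactly the inputs on which A raises IndexError: some entry outside [-N, N-1].
def Pre_analyze_cycles (permutation : List Int) : Prop :=
  ∀ x ∈ permutation, -(permutation.length : Int) ≤ x ∧ x < (permutation.length : Int)
instance (permutation : List Int) : Decidable (Pre_analyze_cycles permutation) := by
  unfold Pre_analyze_cycles; infer_instance

def pvWitness_analyze_cycles : List Int := [1, 2, 0, -1]

def Spec_analyze_cycles (permutation : List Int) (out : (List (Int × Int)) × Int) : Prop := out = analyze_cycles_alt permutation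
instance (permutation : List Int) (out : (List (Int × Int)) × Int) : Decidable (Spec_analyze_cycles permutation out) := by unfold Spec_analyze_cycles; infer_instance

-- ===== CLAIM (what is proved, stated in full; the proofs are below) =====
def Claim_equal_analyze_cycles : Prop := ∀ (permutation : List Int), Dom_analyze_cycles permutation → Pre_analyze_cycles permutation → Spec_analyze_cycles permutation (analyze_cycles permutation)

-- ===== LEMMAS AND PROOFS =====

-- ---- shared semantic layer: the successor function on cell indices and minimum labels ----

-- the wrapped successor: cell k steps to the cell permutation[k] denotes
def gfun (perm : List Int) (k : Nat) : Nat :=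
  (PySem.Int.mod (perm.getD k 0) (perm.length : Int)).toNat

-- j is reachable from i by following successors
def reach (perm : List Int) (i j : Nat) : Prop := ∃ t : Nat, (gfun perm)^[t] i = j

-- the minimum start index whose forward orbit contains j (A's "first visit" index; B's fixpoint label)
noncomputable def mlab (perm : List Int) (j : Nat) : Nat := sInf {i | reach perm i j}

noncomputable def leaders (perm : List Int) : List Nat :=
  (List.range perm.length).filter (fun i => mlab perm i = i)

noncomputable def classSize (perm : List Int) (i : Nat) : Nat :=
  ((List.range perm.length).filter (fun j => mlab perm j = i)).length

noncomputable def lengths (perm : List Int) : List Int :=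
  (leaders perm).map (fun i => ((classSize perm i : Nat) : Int))

noncomputable def labList (perm : List Int) : List Int :=
  (List.range perm.length).map (fun j => ((mlab perm j : Nat) : Int))

noncomputable def mask (perm : List Int) (b : Nat) : List Bool :=
  (List.range perm.length).map (fun j => decide (mlab perm j < b))

-- ---- index arithmetic (wraparound) ----

lemma pv_emod_neg {n j : Int} (h1 : -n ≤ j) (h2 : j < 0) : j % n = j + n := by
  have h3 : (j + n * 1) % n = j % n := Int.add_mul_emod_self_left j n 1
  rw [mul_one] at h3
  rw [← h3, Int.emod_eq_of_lt (by omega) (by omega)]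

lemma pv_mod_small {n j : Int} (h1 : 0 ≤ j) (h2 : j < n) : PySem.Int.mod j n = j := by
  rw [PySem.Int.mod_eq_emod_of_pos (by omega), Int.emod_eq_of_lt h1 h2]

lemma pv_pyIdx_eq_mod (n : Nat) (j : Int) (h1 : -(n : Int) ≤ j) (h2 : j < (n : Int)) :
    PySem.List.pyIdx? n j = some (PySem.Int.mod j (n : Int)).toNat := by
  have hn : 0 < (n : Int) := by omega
  rw [PySem.Int.mod_eq_emod_of_pos hn]
  by_cases hj : 0 ≤ j
  · rw [Int.emod_eq_of_lt hj h2]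
    simp [PySem.List.pyIdx?, hj, h2]
  · have hj2 : j % (n : Int) = j + n := pv_emod_neg h1 (by omega)
    simp only [PySem.List.pyIdx?, if_neg hj, if_pos h1, hj2]
    congr 1
    omega

lemma pv_get_eq_mod {α : Type} (xs : List α) (L : Nat) (hL : xs.length = L) (j : Int)
    (h1 : -(L : Int) ≤ j) (h2 : j < (L : Int)) :
    PySem.List.pyGet? xs j = xs[(PySem.Int.mod j (L : Int)).toNat]? := by
  subst hL
  simp [PySem.List.pyGet?, pv_pyIdx_eq_mod _ _ h1 h2]

lemma pv_set_eq_mod {α : Type} (xs : List α) (L : Nat) (hL : xs.length = L) (j : Int) (v : α)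
    (h1 : -(L : Int) ≤ j) (h2 : j < (L : Int)) :
    PySem.List.pySetD xs j v = xs.set (PySem.Int.mod j (L : Int)).toNat v := by
  subst hL
  simp [PySem.List.pySetD, PySem.List.pySet?, pv_pyIdx_eq_mod _ _ h1 h2]

lemma pv_mod_bounds {n j : Int} (hn : 0 < n) :
    0 ≤ PySem.Int.mod j n ∧ PySem.Int.mod j n < n :=
  ⟨PySem.Int.mod_nonneg j hn, PySem.Int.mod_lt j hn⟩

-- gfun maps [0, n) into [0, n)
lemma gfun_lt (perm : List Int) (hn : 0 < perm.length) (k : Nat) :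
    gfun perm k < perm.length := by
  have := pv_mod_bounds (n := (perm.length : Int)) (j := perm.getD k 0) (by exact_mod_cast hn)
  unfold gfun
  omega

-- ---- basic mlab lemmas ----

lemma reach_refl (perm : List Int) (j : Nat) : reach perm j j := ⟨0, rfl⟩

lemma reach_trans {perm : List Int} {i j k : Nat}
    (h1 : reach perm i j) (h2 : reach perm j k) : reach perm i k := by
  obtain ⟨t1, h1⟩ := h1
  obtain ⟨t2, h2⟩ := h2
  exact ⟨t2 + t1, by rw [Function.iterate_add_apply, h1, h2]⟩

lemma reach_step (perm : List Int) (k : Nat) : reach perm k (gfun perm k) := ⟨1, rfl⟩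

lemma mlab_le (perm : List Int) {i j : Nat} (h : reach perm i j) : mlab perm j ≤ i :=
  Nat.sInf_le h

lemma mlab_reach (perm : List Int) (j : Nat) : reach perm (mlab perm j) j :=
  Nat.sInf_mem (⟨j, reach_refl perm j⟩ : {i | reach perm i j}.Nonempty)

lemma mlab_le_self (perm : List Int) (j : Nat) : mlab perm j ≤ j :=
  mlab_le perm (reach_refl perm j)

lemma mlab_mono {perm : List Int} {i j : Nat} (h : reach perm i j) :
    mlab perm j ≤ mlab perm i :=
  mlab_le perm (reach_trans (mlab_reach perm i) h)

-- mlab stays below n on [0, n)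
lemma mlab_lt (perm : List Int) {j : Nat} (h : j < perm.length) :
    mlab perm j < perm.length := lt_of_le_of_lt (mlab_le_self perm j) h

-- a value of mlab is a leader
lemma mlab_is_leader (perm : List Int) (j : Nat) :
    mlab perm (mlab perm j) = mlab perm j :=
  Nat.le_antisymm (mlab_le_self perm _) (mlab_mono (mlab_reach perm j))

-- ---- A side: the fold computes (mask n, counter (lengths)) ----

-- the walk path out of start cell i
def pathf (perm : List Int) (i t : Nat) : Nat := (gfun perm)^[t] i

-- has the walk from i already passed cell x within its first t steps?
def hitBefore (perm : List Int) (i t x : Nat) : Bool :=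
  (List.range t).any (fun s => pathf perm i s == x)

-- A's walk from i stops at step t: the cell was visited by an earlier walk or by this one
def stopP (perm : List Int) (i t : Nat) : Prop :=
  mlab perm (pathf perm i t) < i ∨ hitBefore perm i t (pathf perm i t) = true

-- the number of steps A's walk from i takes
noncomputable def walkT (perm : List Int) (i : Nat) : Nat := sInf {t | stopP perm i t}

-- the visited array during the walk from i, after t steps
noncomputable def maskW (perm : List Int) (i t : Nat) : List Bool :=
  (List.range perm.length).map
    (fun x => decide (mlab perm x < i) || hitBefore perm i t x)

lemma iterate_lt (perm : List Int) (hn : 0 < perm.length) :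
    ∀ (t x : Nat), x < perm.length → (gfun perm)^[t] x < perm.length := by
  intro t
  induction t with
  | zero => intro x hx; simpa using hx
  | succ t ih =>
    intro x hx
    rw [Function.iterate_succ_apply']
    exact gfun_lt perm hn _

lemma pathf_lt (perm : List Int) {i : Nat} (hi : i < perm.length) (t : Nat) :
    pathf perm i t < perm.length := iterate_lt perm (by omega) t i hi

lemma pathf_succ (perm : List Int) (i t : Nat) :
    pathf perm i (t + 1) = gfun perm (pathf perm i t) := Function.iterate_succ_apply' _ _ _

lemma reach_pathf (perm : List Int) (i t : Nat) : reach perm i (pathf perm i t) := ⟨t, rfl⟩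

lemma pathf_shift (perm : List Int) (i a b : Nat) :
    pathf perm i (b + a) = (gfun perm)^[b] (pathf perm i a) :=
  Function.iterate_add_apply _ b a i

lemma stop_exists (perm : List Int) {i : Nat} (hi : i < perm.length) :
    ∃ t, t ≤ perm.length ∧ stopP perm i t := by
  have hn : 0 < perm.length := by omega
  have hcard : Fintype.card (Fin perm.length) < Fintype.card (Fin (perm.length + 1)) := by
    simp
  obtain ⟨a, b, hab, heq⟩ := Fintype.exists_ne_map_eq_of_card_lt
    (fun t : Fin (perm.length + 1) => (⟨pathf perm i t, pathf_lt perm hi t⟩ : Fin perm.length))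
    hcard
  have heq' : pathf perm i a = pathf perm i b := by
    simpa using congrArg Fin.val heq
  rcases Nat.lt_or_ge a.val b.val with h | h
  · refine ⟨b, by omega, Or.inr ?_⟩
    apply List.any_eq_true.mpr
    exact ⟨a, List.mem_range.mpr h, by simp [heq']⟩
  · have hba : b.val < a.val := by
      rcases Nat.lt_or_ge b.val a.val with h2 | h2
      · exact h2
      · have : a.val = b.val := by omega
        exact absurd (Fin.ext this) hab
    refine ⟨a, by omega, Or.inr ?_⟩
    apply List.any_eq_true.mpr
    exact ⟨b, List.mem_range.mpr hba, by simp [heq']⟩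

lemma walkT_le (perm : List Int) {i : Nat} (hi : i < perm.length) :
    walkT perm i ≤ perm.length := by
  obtain ⟨t, ht, hstop⟩ := stop_exists perm hi
  exact le_trans (Nat.sInf_le hstop) ht

lemma stop_walkT (perm : List Int) {i : Nat} (hi : i < perm.length) :
    stopP perm i (walkT perm i) := by
  obtain ⟨t, _, hstop⟩ := stop_exists perm hi
  exact Nat.sInf_mem (⟨t, hstop⟩ : {u | stopP perm i u}.Nonempty)

lemma not_stop_lt (perm : List Int) {i t : Nat} (h : t < walkT perm i) :
    ¬ stopP perm i t := by
  intro hs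
  have h2 : walkT perm i ≤ t := by unfold walkT; exact Nat.sInf_le hs
  omega

lemma pathf_mlab (perm : List Int) {i : Nat} (hld : mlab perm i = i)
    {t : Nat} (ht : t < walkT perm i) : mlab perm (pathf perm i t) = i := by
  have hle : mlab perm (pathf perm i t) ≤ i := by
    have := mlab_mono (reach_pathf perm i t)
    omega
  have hnlt := not_stop_lt perm ht
  unfold stopP at hnlt
  push_neg at hnlt
  omega

lemma mem_pathf (perm : List Int) {i : Nat} (hld : mlab perm i = i) (hi : i < perm.length)
    {x : Nat} (hm : mlab perm x = i) : ∃ t, t < walkT perm i ∧ pathf perm i t = x := by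
  have hreach : reach perm i x := by
    have := mlab_reach perm x
    rwa [hm] at this
  obtain ⟨t1, ht1⟩ := hreach
  have hne : {t | pathf perm i t = x}.Nonempty := ⟨t1, ht1⟩
  set t0 := sInf {t | pathf perm i t = x} with ht0
  have hmem : pathf perm i t0 = x := Nat.sInf_mem hne
  refine ⟨t0, ?_, hmem⟩
  by_contra hge
  push_neg at hge
  rcases stop_walkT perm hi with hstop | hstop
  · -- the walk stopped on an earlier walk's cell: x would be reachable from it
    have : reach perm (pathf perm i (walkT perm i)) x := by
      have h1 : pathf perm i t0 = (gfun perm)^[t0 - walkT perm i] (pathf perm i (walkT perm i)) := by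
        rw [← pathf_shift perm i (walkT perm i) (t0 - walkT perm i)]
        congr 1
        omega
      exact ⟨t0 - walkT perm i, by rw [← h1, hmem]⟩
    have := mlab_mono this
    omega
  · -- the walk closed a cycle: x already occurs at a smaller path index
    obtain ⟨s, hs, hse⟩ := List.any_eq_true.mp hstop
    have hsr : s < walkT perm i := List.mem_range.mp hs
    have hse' : pathf perm i s = pathf perm i (walkT perm i) := by simpa using hse
    have hred : pathf perm i (s + (t0 - walkT perm i)) = x := by
      rw [show s + (t0 - walkT perm i) = (t0 - walkT perm i) + s by omega,
        pathf_shift perm i s (t0 - walkT perm i), hse',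
        ← pathf_shift perm i (walkT perm i) (t0 - walkT perm i)]
      rw [show t0 - walkT perm i + walkT perm i = t0 by omega]
      exact hmem
    have : t0 ≤ s + (t0 - walkT perm i) := Nat.sInf_le hred
    omega

lemma pathf_nodup (perm : List Int) (i : Nat) :
    ((List.range (walkT perm i)).map (pathf perm i)).Nodup := by
  rw [List.nodup_map_iff_inj_on (List.nodup_range)]
  intro a ha b hb hab
  rcases Nat.lt_trichotomy a b with h | h | h
  · exfalso
    apply not_stop_lt perm (List.mem_range.mp hb)
    exact Or.inr (List.any_eq_true.mpr ⟨a, List.mem_range.mpr h, by simp [hab]⟩)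
  · exact h
  · exfalso
    apply not_stop_lt perm (List.mem_range.mp ha)
    exact Or.inr (List.any_eq_true.mpr ⟨b, List.mem_range.mpr h, by simp [hab]⟩)

lemma classSize_eq_walkT (perm : List Int) {i : Nat} (hld : mlab perm i = i)
    (hi : i < perm.length) : classSize perm i = walkT perm i := by
  have hF : ((List.range perm.length).filter (fun j => mlab perm j = i)).Nodup :=
    List.Nodup.filter _ List.nodup_range
  have hL := pathf_nodup perm i
  have hmem : ∀ x, x ∈ (List.range perm.length).filter (fun j => mlab perm j = i) ↔
      x ∈ (List.range (walkT perm i)).map (pathf perm i) := by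
    intro x
    constructor
    · intro hx
      have hx1 : x < perm.length := List.mem_range.mp (List.mem_of_mem_filter hx)
      have hx2 : mlab perm x = i := by simpa using List.of_mem_filter hx
      obtain ⟨t, ht, hte⟩ := mem_pathf perm hld hi hx2
      exact List.mem_map.mpr ⟨t, List.mem_range.mpr ht, hte⟩
    · intro hx
      obtain ⟨t, ht, hte⟩ := List.mem_map.mp hx
      have ht' := List.mem_range.mp ht
      apply List.mem_filter.mpr
      refine ⟨List.mem_range.mpr ?_, by simp [← hte, pathf_mlab perm hld ht']⟩
      rw [← hte]
      exact pathf_lt perm hi t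
  have hcard : ((List.range perm.length).filter (fun j => mlab perm j = i)).toFinset
      = ((List.range (walkT perm i)).map (pathf perm i)).toFinset := by
    apply Finset.ext
    intro x
    simp only [List.mem_toFinset]
    exact hmem x
  have h1 := List.toFinset_card_of_nodup hF
  have h2 := List.toFinset_card_of_nodup hL
  unfold classSize
  rw [← h1, hcard, h2]
  simp

lemma maskW_zero (perm : List Int) (i : Nat) : maskW perm i 0 = mask perm i := by
  unfold maskW mask hitBefore
  apply List.map_congr_left
  intro x _
  simp

lemma maskW_length (perm : List Int) (i t : Nat) : (maskW perm i t).length = perm.length := by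
  unfold maskW; simp

lemma maskW_getElem (perm : List Int) (i t : Nat) {x : Nat} (hx : x < perm.length) :
    (maskW perm i t)[x]'(by rw [maskW_length]; exact hx)
      = (decide (mlab perm x < i) || hitBefore perm i t x) := by
  unfold maskW
  simp

lemma maskW_succ (perm : List Int) {i t : Nat} (ht : t < walkT perm i) :
    (maskW perm i t).set (pathf perm i t) true = maskW perm i (t + 1) := by
  apply List.ext_getElem (by rw [List.length_set, maskW_length, maskW_length])
  intro x h1 h2
  have hx : x < perm.length := by rwa [List.length_set, maskW_length] at h1
  rw [List.getElem_set]
  by_cases hxe : pathf perm i t = x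
  · rw [if_pos hxe, maskW_getElem perm i (t + 1) hx]
    have : hitBefore perm i (t + 1) x = true :=
      List.any_eq_true.mpr ⟨t, List.mem_range.mpr (by omega), by simp [hxe]⟩
    simp [this]
  · rw [if_neg hxe, maskW_getElem perm i t hx, maskW_getElem perm i (t + 1) hx]
    have : hitBefore perm i (t + 1) x = hitBefore perm i t x := by
      unfold hitBefore
      rw [List.range_succ, List.any_append]
      simp [hxe]
    rw [this]

lemma maskW_final (perm : List Int) {i : Nat} (hld : mlab perm i = i) (hi : i < perm.length) :
    maskW perm i (walkT perm i) = mask perm (i + 1) := by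
  unfold maskW mask
  apply List.map_congr_left
  intro x hx
  have hxl : x < perm.length := List.mem_range.mp hx
  by_cases h1 : mlab perm x < i
  · simp [h1, (by omega : mlab perm x < i + 1)]
  · by_cases h2 : mlab perm x = i
    · obtain ⟨t, ht, hte⟩ := mem_pathf perm hld hi h2
      have : hitBefore perm i (walkT perm i) x = true :=
        List.any_eq_true.mpr ⟨t, List.mem_range.mpr ht, by simp [hte]⟩
      simp [this, (by omega : mlab perm x < i + 1)]
    · have h3 : ¬ mlab perm x < i + 1 := by omega
      have h4 : hitBefore perm i (walkT perm i) x = false := by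
        rw [← Bool.not_eq_true]
        intro hc
        obtain ⟨t, ht, hte⟩ := List.any_eq_true.mp hc
        have := pathf_mlab perm hld (List.mem_range.mp ht)
        rw [show pathf perm i t = x by simpa using hte] at this
        exact h2 this
      simp [h1, h3, h4]

lemma walk_step (perm : List Int)
    (hpre : ∀ x ∈ perm, -(perm.length : Int) ≤ x ∧ x < (perm.length : Int))
    {i : Nat} (hld : mlab perm i = i) (hi : i < perm.length) :
    ∀ (d t : Nat), t + d = walkT perm i → ∀ (f : Nat), d < f → ∀ (j : Int) (cyc : List Int),
      -(perm.length : Int) ≤ j → j < (perm.length : Int) →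
      (PySem.Int.mod j (perm.length : Int)).toNat = pathf perm i t →
      (walkA perm f (maskW perm i t) j (t : Int) cyc).1 = maskW perm i (walkT perm i) ∧
      (walkA perm f (maskW perm i t) j (t : Int) cyc).2.1 = ((walkT perm i : Nat) : Int) := by
  intro d
  induction d with
  | zero =>
    intro t hT f hf j cyc hj1 hj2 hjw
    obtain ⟨f, rfl⟩ : ∃ f', f = f' + 1 := ⟨f - 1, by omega⟩
    have hTt : t = walkT perm i := by omega
    subst hTt
    have hplt := pathf_lt perm hi (walkT perm i)
    have hget : PySem.List.pyGet? (maskW perm i (walkT perm i)) j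
        = some ((maskW perm i (walkT perm i))[pathf perm i (walkT perm i)]'(by
          rw [maskW_length]; exact hplt)) := by
      rw [pv_get_eq_mod _ perm.length (maskW_length perm i _) j hj1 hj2, hjw,
        List.getElem?_eq_getElem]
    have hval : (maskW perm i (walkT perm i))[pathf perm i (walkT perm i)]'(by
          rw [maskW_length]; exact hplt) = true := by
      rw [maskW_getElem perm i _ hplt]
      rcases stop_walkT perm hi with h | h
      · simp [h]
      · simp [h]
    rw [hval] at hget
    unfold walkA
    rw [hget]
    exact ⟨rfl, rfl⟩
  | succ d ih =>
    intro t hT f hf j cyc hj1 hj2 hjw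
    obtain ⟨f, rfl⟩ : ∃ f', f = f' + 1 := ⟨f - 1, by omega⟩
    have htT : t < walkT perm i := by omega
    have hplt := pathf_lt perm hi t
    have hnstop := not_stop_lt perm htT
    unfold stopP at hnstop
    push_neg at hnstop
    have hget : PySem.List.pyGet? (maskW perm i t) j
        = some ((maskW perm i t)[pathf perm i t]'(by rw [maskW_length]; exact hplt)) := by
      rw [pv_get_eq_mod _ perm.length (maskW_length perm i _) j hj1 hj2, hjw,
        List.getElem?_eq_getElem]
    have hval : (maskW perm i t)[pathf perm i t]'(by rw [maskW_length]; exact hplt) = false := by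
      rw [maskW_getElem perm i t hplt]
      simp only [Bool.or_eq_false_iff]
      exact ⟨by simp [hnstop.1], by simp [hnstop.2]⟩
    rw [hval] at hget
    have hset : PySem.List.pySetD (maskW perm i t) j true = maskW perm i (t + 1) := by
      rw [pv_set_eq_mod _ perm.length (maskW_length perm i _) j true hj1 hj2, hjw]
      exact maskW_succ perm htT
    have hgetp : PySem.List.pyGet? perm j = some (perm[pathf perm i t]'hplt) := by
      rw [pv_get_eq_mod perm perm.length rfl j hj1 hj2, hjw, List.getElem?_eq_getElem]
    have hpb := hpre (perm[pathf perm i t]'hplt) (List.getElem_mem hplt)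
    have hwrap : (PySem.Int.mod (perm[pathf perm i t]'hplt) (perm.length : Int)).toNat
        = pathf perm i (t + 1) := by
      rw [pathf_succ]
      unfold gfun
      rw [List.getD_eq_getElem _ _ hplt]
    unfold walkA
    rw [hget, hset, hgetp]
    have hcast : (t : Int) + 1 = ((t + 1 : Nat) : Int) := by push_cast; ring
    rw [hcast]
    exact ih (t + 1) (by omega) f (by omega) _ _ hpb.1 hpb.2 hwrap

-- the cycle lengths recorded by the walks started strictly below b, in discovery order
noncomputable def lengthsBelow (perm : List Int) (b : Nat) : List Int :=
  ((List.range b).filter (fun x => mlab perm x = x)).map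
    (fun x => ((classSize perm x : Nat) : Int))

lemma mask_stall (perm : List Int) {i : Nat} (hnl : ¬ mlab perm i = i) :
    mask perm (i + 1) = mask perm i := by
  unfold mask
  apply List.map_congr_left
  intro x _
  by_cases h : mlab perm x = i
  · exfalso
    have := mlab_is_leader perm x
    rw [h] at this
    exact hnl this
  · have : mlab perm x < i + 1 ↔ mlab perm x < i := by omega
    simp [this]

lemma outer_step (perm : List Int)
    (hpre : ∀ x ∈ perm, -(perm.length : Int) ≤ x ∧ x < (perm.length : Int))
    {i : Nat} (hi : i < perm.length) :
    pvStepA perm perm.length (mask perm i, PySem.Dict.counter (lengthsBelow perm i)) i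
      = (mask perm (i + 1), PySem.Dict.counter (lengthsBelow perm (i + 1))) := by
  have hlen : (mask perm i).length = perm.length := by unfold mask; simp
  have hget : PySem.List.pyGet? (mask perm i) (i : Int) = some (decide (mlab perm i < i)) := by
    rw [PySem.List.pyGet?_natCast, List.getElem?_eq_getElem (by omega)]
    unfold mask
    simp
  by_cases hld : mlab perm i = i
  · have hgetf : PySem.List.pyGet? (mask perm i) (i : Int) = some false := by
      rw [hget]
      simp [hld]
    have hwrap : (PySem.Int.mod (i : Int) (perm.length : Int)).toNat = pathf perm i 0 := by
      rw [pv_mod_small (by omega) (by exact_mod_cast hi)]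
      simp [pathf]
    have hw := walk_step perm hpre hld hi (walkT perm i) 0 (by omega) (perm.length + 1)
      (by have := walkT_le perm hi; omega) (i : Int) [] (by omega) (by exact_mod_cast hi) hwrap
    unfold pvStepA
    simp only [hgetf]
    rw [show ((0 : Nat) : Int) = (0 : Int) from rfl] at hw
    rw [← maskW_zero perm i, hw.1, hw.2, maskW_final perm hld hi]
    refine Prod.ext rfl ?_
    simp only []
    rw [show ((walkT perm i : Nat) : Int) = ((classSize perm i : Nat) : Int) by
      rw [classSize_eq_walkT perm hld hi]]
    rw [show lengthsBelow perm (i + 1)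
        = lengthsBelow perm i ++ [((classSize perm i : Nat) : Int)] by
      unfold lengthsBelow
      rw [List.range_succ, List.filter_append, List.map_append]
      simp [hld]]
    rw [PySem.Dict.counter_append_singleton]
  · have hgett : PySem.List.pyGet? (mask perm i) (i : Int) = some true := by
      rw [hget]
      have : mlab perm i < i := lt_of_le_of_ne (mlab_le_self perm i) hld
      simp [this]
    unfold pvStepA
    simp only [hgett]
    rw [mask_stall perm hld]
    rw [show lengthsBelow perm (i + 1) = lengthsBelow perm i by
      unfold lengthsBelow
      rw [List.range_succ, List.filter_append]
      simp [hld]]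

lemma A_fold (perm : List Int)
    (hpre : ∀ x ∈ perm, -(perm.length : Int) ≤ x ∧ x < (perm.length : Int)) :
    (List.range perm.length).foldl (pvStepA perm perm.length)
      (List.replicate perm.length false, PySem.Dict.empty)
      = (mask perm perm.length, PySem.Dict.counter (lengths perm)) := by
  have hinit : (List.replicate perm.length false, (PySem.Dict.empty : PySem.Dict Int Int))
      = (mask perm 0, PySem.Dict.counter (lengthsBelow perm 0)) := by
    refine Prod.ext ?_ rfl
    simp only []
    unfold mask
    symm
    rw [List.eq_replicate_iff]
    refine ⟨by simp, ?_⟩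
    intro b hb
    obtain ⟨x, _, rfl⟩ := List.mem_map.mp hb
    simp
  have hstep : ∀ b, b ≤ perm.length →
      (List.range b).foldl (pvStepA perm perm.length)
        (List.replicate perm.length false, PySem.Dict.empty)
      = (mask perm b, PySem.Dict.counter (lengthsBelow perm b)) := by
    intro b
    induction b with
    | zero => intro _; simpa using hinit
    | succ b ih =>
      intro hb
      rw [List.range_succ, List.foldl_append, ih (by omega)]
      simp only [List.foldl_cons, List.foldl_nil]
      exact outer_step perm hpre (by omega)
  have hfin := hstep perm.length (le_refl _)
  rw [hfin]
  rfl

-- ---- B side: the relaxation fixpoint is labList ----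

-- the label stored for cell j
def labval (l : List Int) (j : Nat) : Int := l.getD j 0

-- loop invariant of B: every stored label is a start index that reaches its cell, and ≤ the cell
def GoodLab (perm : List Int) (l : List Int) : Prop :=
  l.length = perm.length ∧
  ∀ j, j < perm.length → ∃ i : Nat, labval l j = (i : Int) ∧ reach perm i j ∧ i ≤ j

-- termination measure of B's while loop
def labSum (l : List Int) : Nat := (l.map Int.toNat).sum

lemma sum_set (l : List Nat) : ∀ (i : Nat) (a : Nat), i < l.length →
    (l.set i a).sum + l.getD i 0 = l.sum + a := by
  induction l with
  | nil => intro i a h; simp at h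
  | cons x xs ih =>
    intro i a h
    cases i with
    | zero => simp [List.set]; omega
    | succ i =>
      have := ih i a (by simpa using h)
      simp only [List.set, List.sum_cons, List.getD_cons_succ]
      omega

lemma labSum_set (l : List Int) (i : Nat) (a : Int) (hi : i < l.length) (ha : 0 ≤ a)
    (hlt : a < labval l i) :
    labSum (l.set i a) < labSum l := by
  have hmap : (l.set i a).map Int.toNat = (l.map Int.toNat).set i a.toNat := by
    rw [List.map_set]
  have hlen : i < (l.map Int.toNat).length := by simpa using hi
  have hs := sum_set (l.map Int.toNat) i a.toNat hlen
  have hgd : (l.map Int.toNat).getD i 0 = (labval l i).toNat := by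
    rw [List.getD_eq_getElem _ _ hlen, List.getElem_map]
    rw [show labval l i = l[i] from List.getD_eq_getElem _ _ hi]
  unfold labSum
  rw [hmap]
  have hv : 0 ≤ labval l i := le_of_lt (lt_of_le_of_lt ha hlt)
  have : a.toNat < (labval l i).toNat := by omega
  omega

lemma labval_getElem (l : List Int) (j : Nat) (h : j < l.length) : labval l j = l[j] :=
  List.getD_eq_getElem _ _ h

-- one k-step of a sweep: Good is preserved, the measure never grows, the flag is monotone,
-- a flagless step is a no-op certifying local stability, a flagging step strictly decreases
lemma relaxPass_step (perm : List Int)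
    (hpre : ∀ x ∈ perm, -(perm.length : Int) ≤ x ∧ x < (perm.length : Int))
    (k : Nat) (hk : k < perm.length) (st : List Int × Bool) (hg : GoodLab perm st.1) :
    GoodLab perm (relaxPass perm st k).1 ∧
    labSum (relaxPass perm st k).1 ≤ labSum st.1 ∧
    (st.2 = true → (relaxPass perm st k).2 = true) ∧
    ((relaxPass perm st k).2 = false →
      relaxPass perm st k = st ∧ labval st.1 (gfun perm k) ≤ labval st.1 k) ∧
    ((relaxPass perm st k).2 = true → st.2 = false →
      labSum (relaxPass perm st k).1 < labSum st.1) := by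
  obtain ⟨hlen, hgood⟩ := hg
  have hn : 0 < perm.length := by omega
  have hget1 : PySem.List.pyGet? perm (k : Int) = some (perm[k]'hk) := by
    rw [PySem.List.pyGet?_natCast, List.getElem?_eq_getElem hk]
  have hpk := hpre (perm[k]'hk) (List.getElem_mem hk)
  have hgk : gfun perm k = (PySem.Int.mod (perm[k]'hk) (perm.length : Int)).toNat := by
    unfold gfun
    rw [List.getD_eq_getElem _ _ hk]
  have hgklt : gfun perm k < perm.length := gfun_lt perm hn k
  have hget2 : PySem.List.pyGet? st.1 (k : Int) = some (st.1[k]'(by omega)) := by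
    rw [PySem.List.pyGet?_natCast, List.getElem?_eq_getElem (by omega)]
  have hget3 : PySem.List.pyGet? st.1 (perm[k]'hk) = some (st.1[gfun perm k]'(by omega)) := by
    rw [pv_get_eq_mod st.1 perm.length hlen _ hpk.1 hpk.2, ← hgk,
      List.getElem?_eq_getElem (by omega)]
  have hset : PySem.List.pySetD st.1 (perm[k]'hk) (st.1[k]'(by omega))
      = st.1.set (gfun perm k) (st.1[k]'(by omega)) := by
    rw [pv_set_eq_mod st.1 perm.length hlen _ _ hpk.1 hpk.2, ← hgk]
  have hvk : labval st.1 k = st.1[k]'(by omega) := labval_getElem _ _ (by omega)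
  have hvg : labval st.1 (gfun perm k) = st.1[gfun perm k]'(by omega) :=
    labval_getElem _ _ (by omega)
  unfold relaxPass
  rw [hget1]
  simp only [hget2, hget3]
  by_cases hcmp : st.1[k]'(by omega) < st.1[gfun perm k]'(by omega)
  · rw [if_pos hcmp]
    simp only [hset]
    obtain ⟨ik, hik, hrk, hbk⟩ := hgood k (by omega)
    obtain ⟨ig, hig, _, hbg⟩ := hgood (gfun perm k) (by omega)
    have hnn : (0 : Int) ≤ st.1[k]'(by omega) := by rw [← hvk, hik]; positivity
    have hdec : labSum (st.1.set (gfun perm k) (st.1[k]'(by omega))) < labSum st.1 :=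
      labSum_set st.1 (gfun perm k) _ (by omega) hnn (by rw [hvg]; exact hcmp)
    refine ⟨⟨by simpa using hlen, ?_⟩, le_of_lt hdec, by simp, by simp, fun _ _ => hdec⟩
    intro j hj
    by_cases hje : j = gfun perm k
    · subst hje
      refine ⟨ik, ?_, reach_trans hrk (reach_step perm k), ?_⟩
      · rw [labval, List.getD_eq_getElem _ _ (by simp only [List.length_set]; omega),
          List.getElem_set_self]
        · rw [← hvk, hik]
      · -- the written value is strictly below the old one, which was ≤ its cell
        have hcmp2 := hcmp
        rw [← hvk, ← hvg, hik, hig] at hcmp2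
        have : ik < ig := by exact_mod_cast hcmp2
        omega
    · obtain ⟨i, hi1, hi2, hi3⟩ := hgood j hj
      refine ⟨i, ?_, hi2, hi3⟩
      rw [labval, List.getD_eq_getElem _ _ (by simp only [List.length_set]; omega),
        List.getElem_set_ne (by omega)]
      rw [labval, List.getD_eq_getElem _ _ (by omega)] at hi1
      exact hi1
  · rw [if_neg hcmp]
    refine ⟨⟨hlen, hgood⟩, le_refl _, fun h => h, fun _ => ⟨rfl, ?_⟩, fun h1 h2 => ?_⟩
    · rw [hvk, hvg]; omega
    · rw [h1] at h2; cases h2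
  
-- a full sweep, as a fold over any sublist of range n
lemma relaxSweep (perm : List Int)
    (hpre : ∀ x ∈ perm, -(perm.length : Int) ≤ x ∧ x < (perm.length : Int)) :
    ∀ (ks : List Nat), (∀ k ∈ ks, k < perm.length) → ∀ (st : List Int × Bool),
      GoodLab perm st.1 →
      GoodLab perm (ks.foldl (relaxPass perm) st).1 ∧
      labSum (ks.foldl (relaxPass perm) st).1 ≤ labSum st.1 ∧
      (st.2 = true → (ks.foldl (relaxPass perm) st).2 = true) ∧
      ((ks.foldl (relaxPass perm) st).2 = false →
        (ks.foldl (relaxPass perm) st) = st ∧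
        ∀ k ∈ ks, labval st.1 (gfun perm k) ≤ labval st.1 k) ∧
      ((ks.foldl (relaxPass perm) st).2 = true → st.2 = false →
        labSum (ks.foldl (relaxPass perm) st).1 < labSum st.1) := by
  intro ks
  induction ks with
  | nil =>
    intro _ st hg
    refine ⟨hg, le_refl _, fun h => h, fun _ => ⟨rfl, by simp⟩, fun h1 h2 => ?_⟩
    simp only [List.foldl_nil] at h1
    rw [h2] at h1
    cases h1
  | cons k ks ih =>
    intro hks st hg
    have hk : k < perm.length := hks k List.mem_cons_self
    obtain ⟨g1, le1, mono1, stop1, dec1⟩ := relaxPass_step perm hpre k hk st hg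
    obtain ⟨g2, le2, mono2, stop2, dec2⟩ :=
      ih (fun x hx => hks x (List.mem_cons_of_mem _ hx)) (relaxPass perm st k) g1
    simp only [List.foldl_cons]
    refine ⟨g2, le_trans le2 le1, fun h => mono2 (mono1 h), ?_, ?_⟩
    · intro hfin
      obtain ⟨heq, hstab⟩ := stop2 hfin
      have hflag : (relaxPass perm st k).2 = false := by
        by_contra hc
        have := mono2 (by revert hc; cases (relaxPass perm st k).2 <;> simp)
        rw [hfin] at this; cases this
      obtain ⟨heq1, hstab1⟩ := stop1 hflag
      rw [heq, heq1]
      refine ⟨rfl, ?_⟩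
      intro x hx
      rcases List.mem_cons.mp hx with h | h
      · subst h; exact hstab1
      · have := hstab x h
        rw [heq1] at this
        exact this
    · intro hfin hinit
      by_cases hflag : (relaxPass perm st k).2 = true
      · exact lt_of_le_of_lt le2 (dec1 hflag hinit)
      · have hflag' : (relaxPass perm st k).2 = false := by
          revert hflag; cases (relaxPass perm st k).2 <;> simp
        obtain ⟨heq1, _⟩ := stop1 hflag'
        rw [heq1] at dec2 hfin ⊢
        exact dec2 hfin hinit

-- a stable labelling equals mlab everywhere
lemma stable_eq_mlab (perm : List Int) (l : List Int) (hg : GoodLab perm l)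
    (hstab : ∀ k, k < perm.length → labval l (gfun perm k) ≤ labval l k) :
    l = labList perm := by
  obtain ⟨hlen, hgood⟩ := hg
  have hiter : ∀ (t : Nat) (i : Nat), i < perm.length →
      (gfun perm)^[t] i < perm.length ∧ labval l ((gfun perm)^[t] i) ≤ labval l i := by
    intro t
    induction t with
    | zero => intro i hi; exact ⟨hi, le_refl _⟩
    | succ t ih =>
      intro i hi
      obtain ⟨hlt, hle⟩ := ih i hi
      rw [Function.iterate_succ_apply']
      exact ⟨gfun_lt perm (by omega) _, le_trans (hstab _ hlt) hle⟩
  apply List.ext_getElem (by simp [hlen, labList])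
  intro j h1 h2
  have hj : j < perm.length := by omega
  have hup : labval l j ≤ ((mlab perm j : Nat) : Int) := by
    obtain ⟨t, ht⟩ := mlab_reach perm j
    have := (hiter t (mlab perm j) (mlab_lt perm hj)).2
    rw [ht] at this
    obtain ⟨i, hi1, _, hi3⟩ := hgood (mlab perm j) (mlab_lt perm hj)
    rw [hi1] at this
    have : labval l j ≤ (i : Int) := this
    have : (i : Int) ≤ ((mlab perm j : Nat) : Int) := by exact_mod_cast hi3
    omega
  have hlo : ((mlab perm j : Nat) : Int) ≤ labval l j := by
    obtain ⟨i, hi1, hi2, _⟩ := hgood j hj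
    rw [hi1]
    exact_mod_cast mlab_le perm hi2
  have : labval l j = ((mlab perm j : Nat) : Int) := le_antisymm hup hlo
  rw [← labval_getElem l j (by omega), this]
  unfold labList
  simp

lemma labSum_cast (l : List Nat) : labSum (l.map (fun j => Int.ofNat j)) = l.sum := by
  induction l with
  | nil => rfl
  | cons x xs ih =>
    unfold labSum at ih ⊢
    simp only [List.map_cons, List.sum_cons]
    rw [ih]
    simp

lemma range_sum_le (n : Nat) : (List.range n).sum ≤ n * n := by
  induction n with
  | zero => simp
  | succ n ih =>
    rw [List.range_succ, List.sum_append]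
    simp only [List.sum_cons, List.sum_nil]
    nlinarith

lemma relaxLoop_eq (perm : List Int)
    (hpre : ∀ x ∈ perm, -(perm.length : Int) ≤ x ∧ x < (perm.length : Int)) :
    ∀ (fuel : Nat) (l : List Int), GoodLab perm l → labSum l < fuel →
      relaxLoop perm perm.length fuel l = labList perm := by
  intro fuel
  induction fuel with
  | zero => intro l _ h; omega
  | succ fuel ih =>
    intro l hg hs
    obtain ⟨g1, le1, _, stop1, dec1⟩ := relaxSweep perm hpre (List.range perm.length)
      (fun k hk => List.mem_range.mp hk) (l, false) hg
    unfold relaxLoop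
    by_cases hflag : ((List.range perm.length).foldl (relaxPass perm) (l, false)).2 = true
    · rw [if_pos hflag]
      refine ih _ g1 ?_
      have h2 := dec1 hflag rfl
      have h3 : labSum (l, false).1 = labSum l := rfl
      omega
    · have hflag' : ((List.range perm.length).foldl (relaxPass perm) (l, false)).2 = false := by
        revert hflag; cases ((List.range perm.length).foldl (relaxPass perm) (l, false)).2 <;> simp
      rw [if_neg (by rw [hflag']; simp)]
      obtain ⟨heq, hstab⟩ := stop1 hflag'
      rw [heq]
      exact stable_eq_mlab perm l hg (fun k hk => hstab k (List.mem_range.mpr hk))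

lemma B_fold (perm : List Int)
    (hpre : ∀ x ∈ perm, -(perm.length : Int) ≤ x ∧ x < (perm.length : Int)) :
    relaxLoop perm perm.length (perm.length * perm.length + 1)
      ((List.range perm.length).map (fun j => Int.ofNat j)) = labList perm := by
  apply relaxLoop_eq perm hpre
  · refine ⟨by simp, ?_⟩
    intro j hj
    refine ⟨j, ?_, reach_refl perm j, le_refl j⟩
    rw [labval, List.getD_eq_getElem _ _ (by simpa using hj), List.getElem_map,
      List.getElem_range]
    rfl
  · rw [labSum_cast]
    have := range_sum_le perm.length
    omega

-- ---- assembly lemmas ----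

-- first occurrences in labList are exactly the leaders, in ascending order
lemma ofList_prefix (perm : List Int) :
    ∀ b : Nat,
      PySem.Set.ofList ((List.range b).map (fun j => ((mlab perm j : Nat) : Int)))
        = ((List.range b).filter (fun i => mlab perm i = i)).map (fun i => ((i : Nat) : Int)) := by
  intro b
  induction b with
  | zero => rfl
  | succ b ih =>
    rw [List.range_succ, List.map_append, PySem.Set.ofList_append, List.filter_append]
    simp only [List.map_singleton, List.filter_cons, List.filter_nil]
    rw [PySem.Set.update_cons, PySem.Set.update_nil, ih]
    by_cases hl : mlab perm b = b
    · have hnot : ((mlab perm b : Nat) : Int)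
          ∉ ((List.range b).filter (fun i => mlab perm i = i)).map (fun i => ((i : Nat) : Int)) := by
        intro hmem
        obtain ⟨i, hi, hie⟩ := List.mem_map.mp hmem
        have hib : i < b := List.mem_range.mp (List.mem_of_mem_filter hi)
        have : mlab perm b = i := by exact_mod_cast hie.symm
        omega
      rw [show PySem.Set.add (((List.range b).filter (fun i => mlab perm i = i)).map
            (fun i => ((i : Nat) : Int))) ((mlab perm b : Nat) : Int)
          = ((List.range b).filter (fun i => mlab perm i = i)).map (fun i => ((i : Nat) : Int))
            ++ [((mlab perm b : Nat) : Int)] by simp [PySem.Set.add, hnot]]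
      simp [hl]
    · have hlt : mlab perm b < b := lt_of_le_of_ne (mlab_le_self perm b) hl
      have hmem : ((mlab perm b : Nat) : Int)
          ∈ ((List.range b).filter (fun i => mlab perm i = i)).map (fun i => ((i : Nat) : Int)) := by
        apply List.mem_map.mpr
        exact ⟨mlab perm b, List.mem_filter.mpr
          ⟨List.mem_range.mpr hlt, by simp [mlab_is_leader perm b]⟩, rfl⟩
      rw [show PySem.Set.add (((List.range b).filter (fun i => mlab perm i = i)).map
            (fun i => ((i : Nat) : Int))) ((mlab perm b : Nat) : Int)
          = ((List.range b).filter (fun i => mlab perm i = i)).map (fun i => ((i : Nat) : Int))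
          by simp [PySem.Set.add, hmem]]
      simp [hl]

lemma ofList_labList (perm : List Int) :
    PySem.Set.ofList (labList perm) = (leaders perm).map (fun i => ((i : Nat) : Int)) :=
  ofList_prefix perm perm.length

lemma count_labList (perm : List Int) (i : Nat) :
    (labList perm).count ((i : Nat) : Int) = classSize perm i := by
  unfold labList classSize
  rw [List.count, List.countP_map, List.countP_eq_length_filter]
  congr 1
  apply List.filter_congr
  intro j _
  simp only [Function.comp]
  rw [show ((((mlab perm j : Nat) : Int)) == ((i : Nat) : Int)) = decide (mlab perm j = i) by
    by_cases h : mlab perm j = i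
    · simp [h]
    · simp only [decide_eq_false h, beq_eq_false_iff_ne, ne_eq]
      intro hc
      exact h (by exact_mod_cast hc)]

lemma lengths_pos (perm : List Int) : ∀ x ∈ lengths perm, 1 ≤ x := by
  intro x hx
  obtain ⟨i, hi, rfl⟩ := List.mem_map.mp hx
  have hmem : i ∈ (List.range perm.length).filter (fun j => mlab perm j = i) := by
    apply List.mem_filter.mpr
    refine ⟨List.mem_of_mem_filter hi, ?_⟩
    have := List.of_mem_filter hi
    simpa using this
  have : 1 ≤ classSize perm i := List.length_pos_of_mem hmem
  exact_mod_cast this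

lemma values_counter_labList (perm : List Int) :
    (PySem.Dict.counter (labList perm)).values = lengths perm := by
  have h : (PySem.Dict.counter (labList perm)).values
      = (PySem.Dict.counter (labList perm)).items.map Prod.snd := rfl
  rw [h, PySem.Dict.items_counter, ofList_labList perm]
  simp only [List.map_map]
  unfold lengths
  apply List.map_congr_left
  intro i _
  simp [Function.comp, count_labList perm i]

-- ---- lcm fold lemmas ----

lemma pyLcm_eq (a k : Int) (ha : 0 < a) (hk : 0 < k) :
    pyLcm a k = ((Int.lcm a k : Nat) : Int) := by
  have hg : 0 < ((Int.gcd a k : Nat) : Int) := by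
    have : 0 < Int.gcd a k := Int.gcd_pos_iff.mpr (Or.inl (by omega))
    exact_mod_cast this
  unfold pyLcm
  rw [PySem.Int.floordiv_eq_ediv_of_pos hg]
  have hmul : a * k = ((Int.gcd a k : Nat) : Int) * ((Int.lcm a k : Nat) : Int) := by
    have h := Int.gcd_mul_lcm a k
    have h2 : ((Int.gcd a k * Int.lcm a k : Nat) : Int) = ((a.natAbs * k.natAbs : Nat) : Int) := by
      exact_mod_cast congrArg (fun m : Nat => (m : Int)) h
    push_cast at h2
    rw [abs_of_pos ha, abs_of_pos hk] at h2
    omega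
  rw [hmul, Int.mul_ediv_cancel_left _ (by omega)]

lemma lcm_fold_eq :
    ∀ (ks : List Int) (a : Int), 0 < a → (∀ k ∈ ks, 1 ≤ k) →
      ks.foldl pyLcm a = ks.foldl (fun a k => ((Int.lcm a k : Nat) : Int)) a ∧
      0 < ks.foldl pyLcm a := by
  intro ks
  induction ks with
  | nil => intro a ha _; exact ⟨rfl, ha⟩
  | cons k ks ih =>
    intro a ha hks
    have hk : 1 ≤ k := hks k (List.mem_cons_self)
    have hlcm : 0 < ((Int.lcm a k : Nat) : Int) := by
      have : 0 < Int.gcd a k * Int.lcm a k := by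
        rw [Int.gcd_mul_lcm]
        have h1 : 0 < a.natAbs := by omega
        have h2 : 0 < k.natAbs := by omega
        positivity
      have : 0 < Int.lcm a k := by positivity
      exact_mod_cast this
    have heq := pyLcm_eq a k ha (by omega)
    simp only [List.foldl_cons, heq]
    exact ih _ hlcm (fun x hx => hks x (List.mem_cons_of_mem _ hx))

-- ===== VERDICT (by name: the statement is the Claim_ definition above) =====
theorem analyze_cycles_spec : Claim_equal_analyze_cycles := by
  intro perm _ hpre
  unfold Pre_analyze_cycles at hpre
  unfold Spec_analyze_cycles
  simp only [analyze_cycles, analyze_cycles_alt]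
  rw [A_fold perm hpre, B_fold perm hpre]
  rw [show (labList perm).foldl (fun (d : PySem.Dict Int Int) l => d.insert l (d.getD l 0 + 1))
      PySem.Dict.empty = PySem.Dict.counter (labList perm) from
      PySem.Dict.foldl_insert_getD_add_one_eq_counter _,
    values_counter_labList perm, PySem.Dict.foldl_insert_getD_add_one_eq_counter]
  have hks : ∀ k ∈ (PySem.Dict.counter (lengths perm)).keys, (1 : Int) ≤ k := by
    intro k hk
    rw [PySem.Dict.keys_counter] at hk
    exact lengths_pos perm k ((PySem.Set.mem_ofList _ _).mp hk)
  by_cases hsz : (PySem.Dict.counter (lengths perm)).size = 0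
  · have hitems : (PySem.Dict.counter (lengths perm)).items = [] := by
      have : (PySem.Dict.counter (lengths perm)).items.length = 0 := hsz
      simpa using this
    have hkeys : (PySem.Dict.counter (lengths perm)).keys = [] := by
      have h : (PySem.Dict.counter (lengths perm)).keys
          = (PySem.Dict.counter (lengths perm)).items.map Prod.fst := rfl
      rw [h, hitems]; rfl
    rw [hkeys]
    simp [hsz]
  · simp only [if_pos hsz]
    exact congrArg _ (lcm_fold_eq (PySem.Dict.counter (lengths perm)).keys 1 one_pos hks).1
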